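-- pv_equiv track=rewrite | github.com/shazychinnu/testing | nocode.py | find_sheet_case_insensitive
-- ===== SOURCE A (Python) =====
-- def find_sheet_case_insensitive(sheet_names, target_name):
--     target_lower = target_name.lower().replace(" ", "")
--     for name in sheet_names:
--         if name.lower().replace(" ", "") == target_lower:
--             return name
--     # fallback: if any name contains the words ignoring spaces/case
--     for name in sheet_names:
--         if target_lower in name.lower().replace(" ", ""):
--             return name
--     return None
-- ===== SOURCE B (Python) =====
-- def find_sheet_case_insensitive(sheet_names, target_name):
--     target_lower = target_name.lower().replace(" ", "")
--     fallback = None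
--     for name in sheet_names:
--         norm = name.lower().replace(" ", "")
--         if norm == target_lower:
--             return name
--         if fallback is None and target_lower in norm:
--             fallback = name
--     return fallback
-- ===== Notes on version B (the rewrite author's own statement) =====
-- stated objective: alternative
-- what changed: Single pass maintaining a first-substring-match fallback variable instead of two sequential scans, so each name is lowered/space-stripped once instead of twice; exact-match priority is preserved by only returning the fallback after the loop.
import Mathlib
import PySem

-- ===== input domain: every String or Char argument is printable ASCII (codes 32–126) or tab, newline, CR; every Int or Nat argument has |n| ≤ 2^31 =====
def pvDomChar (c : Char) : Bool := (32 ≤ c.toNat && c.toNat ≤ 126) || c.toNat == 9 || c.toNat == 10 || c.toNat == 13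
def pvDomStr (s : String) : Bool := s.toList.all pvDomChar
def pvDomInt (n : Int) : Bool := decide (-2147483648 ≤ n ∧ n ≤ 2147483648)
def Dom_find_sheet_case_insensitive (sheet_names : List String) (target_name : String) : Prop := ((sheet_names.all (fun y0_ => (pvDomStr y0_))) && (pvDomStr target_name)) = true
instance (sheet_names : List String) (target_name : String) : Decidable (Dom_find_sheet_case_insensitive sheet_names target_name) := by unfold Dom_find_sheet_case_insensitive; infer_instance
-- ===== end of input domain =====

-- B replaces A's two sequential scans by one pass that keeps a first-substring-match fallback; same return value (alternative decomposition, no speed claim).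

-- ===== PORT A =====
-- A, first loop: return the first name whose normalization equals target_lower
def pvAExact (t : String) : List String → Option String
  | [] => none
  | n :: rest =>
    if PySem.Str.replace (PySem.Str.lower n) " " "" == t then some n else pvAExact t rest

-- A, second loop: return the first name whose normalization contains target_lower
def pvASub (t : String) : List String → Option String
  | [] => none
  | n :: rest =>
    if PySem.Str.isIn t (PySem.Str.replace (PySem.Str.lower n) " " "") then some n else pvASub t rest

def find_sheet_case_insensitive (sheet_names : List String) (target_name : String) : Option String :=
  let target_lower := PySem.Str.replace (PySem.Str.lower target_name) " " ""
  match pvAExact target_lower sheet_names with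
  | some n => some n
  | none => pvASub target_lower sheet_names

-- ===== PORT B =====
-- B's single loop carrying the fallback accumulator
def pvBLoop (t : String) : List String → Option String → Option String
  | [], fb => fb
  | n :: rest, fb =>
    let norm := PySem.Str.replace (PySem.Str.lower n) " " ""
    if norm == t then some n
    else pvBLoop t rest (if fb.isNone && PySem.Str.isIn t norm then some n else fb)

def find_sheet_case_insensitive_alt (sheet_names : List String) (target_name : String) : Option String :=
  let target_lower := PySem.Str.replace (PySem.Str.lower target_name) " " ""
  pvBLoop target_lower sheet_names none

-- ===== PRECONDITION & SPEC =====
def Spec_find_sheet_case_insensitive (sheet_names : List String) (target_name : String) (out : Option String) : Prop := out = find_sheet_case_insensitive_alt sheet_names target_name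
instance (sheet_names : List String) (target_name : String) (out : Option String) : Decidable (Spec_find_sheet_case_insensitive sheet_names target_name out) := by unfold Spec_find_sheet_case_insensitive; infer_instance

-- ===== CLAIM (what is proved, stated in full; the proofs are below) =====
def Claim_equal_find_sheet_case_insensitive : Prop := ∀ (sheet_names : List String) (target_name : String), Dom_find_sheet_case_insensitive sheet_names target_name → Spec_find_sheet_case_insensitive sheet_names target_name (find_sheet_case_insensitive sheet_names target_name)

-- ===== LEMMAS AND PROOFS =====
theorem pvBLoop_eq (t : String) (xs : List String) (fb : Option String) :
    pvBLoop t xs fb =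
      match pvAExact t xs with
      | some n => some n
      | none => match fb with
        | some f => some f
        | none => pvASub t xs := by
  induction xs generalizing fb with
  | nil => cases fb <;> simp [pvBLoop, pvAExact, pvASub]
  | cons n rest ih =>
    simp only [pvBLoop, pvAExact, pvASub]
    by_cases he : (PySem.Str.replace (PySem.Str.lower n) " " "" == t) = true
    · simp [he]
    · simp only [he, if_neg, Bool.not_eq_true] at *
      rw [ih]
      cases fb with
      | some f => simp
      | none =>
        cases pvAExact t rest <;> split_ifs <;> simp_all

-- ===== VERDICT (by name: the statement is the Claim_ definition above) =====
theorem find_sheet_case_insensitive_spec : Claim_equal_find_sheet_case_insensitive := by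
  intro xs t _
  unfold Spec_find_sheet_case_insensitive find_sheet_case_insensitive find_sheet_case_insensitive_alt
  rw [pvBLoop_eq]
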